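-- pv_equiv track=rewrite | github.com/jvargh/v2-azure-waf-agentic-review-system | backend/app/analysis/document_analyzer.py | _classify_case_themes
-- ===== SOURCE A (Python) =====
-- from typing import Dict, List, Optional, Tuple, TYPE_CHECKING, Any
--
-- def _classify_case_themes(cases: List[Dict[str, str]]) -> Dict[str, List[Dict]]:
--     """Classify cases into thematic buckets (authentication, latency, etc.)."""
--     themes: Dict[str, List[Dict]] = {
--         "authentication": [],
--         "latency": [],
--         "availability": [],
--         "configuration": [],
--         "security": [],
--         "cost": [],
--         "other": []
--     }
--     for case in cases:
--         case_text = " ".join(str(v) for v in case.values()).lower()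
--         if any(k in case_text for k in ["auth", "login", "token", "401", "403"]):
--             themes["authentication"].append(case)
--         elif any(k in case_text for k in ["slow", "latency", "timeout", "performance"]):
--             themes["latency"].append(case)
--         elif any(k in case_text for k in ["down", "outage", "unavailable", "503", "500"]):
--             themes["availability"].append(case)
--         elif any(k in case_text for k in ["config", "setting", "parameter", "misconfigur"]):
--             themes["configuration"].append(case)
--         elif any(k in case_text for k in ["security", "vulnerability", "breach", "unauthorized"]):
--             themes["security"].append(case)
--         elif any(k in case_text for k in ["cost", "bill", "charge", "expensive"]):
--             themes["cost"].append(case)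
--         else:
--             themes["other"].append(case)
--     return {k: v for k, v in themes.items() if v}
-- ===== SOURCE B (Python) =====
-- from typing import Dict, List
--
-- _THEME_TABLE = [
--     ("authentication", ["auth", "login", "token", "401", "403"]),
--     ("latency", ["slow", "latency", "timeout", "performance"]),
--     ("availability", ["down", "outage", "unavailable", "503", "500"]),
--     ("configuration", ["config", "setting", "parameter", "misconfigur"]),
--     ("security", ["security", "vulnerability", "breach", "unauthorized"]),
--     ("cost", ["cost", "bill", "charge", "expensive"]),
-- ]
--
-- def _theme_of(case):
--     text = " ".join(str(v) for v in case.values()).lower()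
--     return next((name for name, kws in _THEME_TABLE if any(k in text for k in kws)), "other")
--
-- def _classify_case_themes(cases: List[Dict[str, str]]) -> Dict[str, List[Dict]]:
--     labeled = [(case, _theme_of(case)) for case in cases]
--     result: Dict[str, List[Dict]] = {}
--     for name in [t for t, _ in _THEME_TABLE] + ["other"]:
--         bucket = [c for c, l in labeled if l == name]
--         if bucket:
--             result[name] = bucket
--     return result
-- ===== Notes on version B (the rewrite author's own statement) =====
-- stated objective: simpler
-- what changed: Replaces the seven-branch if/elif chain that mutates a pre-built dict of buckets with a declarative ordered (theme, keywords) table: each case is labelled by the first matching table row (default 'other'), and the output dict is built per-theme by grouping the labelled cases, skipping empty themes.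
import Mathlib
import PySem

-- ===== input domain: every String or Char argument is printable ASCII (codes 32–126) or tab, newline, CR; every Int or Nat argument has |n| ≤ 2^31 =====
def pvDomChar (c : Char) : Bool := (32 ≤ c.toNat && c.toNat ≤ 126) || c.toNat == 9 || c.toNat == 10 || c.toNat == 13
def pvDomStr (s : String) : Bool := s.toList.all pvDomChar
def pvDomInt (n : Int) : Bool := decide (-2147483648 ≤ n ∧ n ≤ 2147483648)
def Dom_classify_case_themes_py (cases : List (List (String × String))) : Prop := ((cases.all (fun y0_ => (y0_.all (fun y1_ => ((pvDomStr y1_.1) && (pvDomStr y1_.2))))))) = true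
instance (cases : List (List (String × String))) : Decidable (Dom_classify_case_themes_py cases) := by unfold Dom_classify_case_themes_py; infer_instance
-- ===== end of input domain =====

-- B replaces A's seven-branch if/elif chain mutating a pre-built dict of buckets by a
-- label-then-group-by pass over an ordered keyword table (objective: simpler decomposition).

-- ===== PORT A =====
-- case_text = " ".join(str(v) for v in case.values()).lower()   (shared line of both Pythons)
def pvCaseText (case : List (String × String)) : String :=
  PySem.Str.lower (PySem.Str.join " " ((PySem.Dict.ofList case).values))

-- the body of A's for-loop: the if/elif chain appending `case` to one bucket
def pvStepA (themes : PySem.Dict String (List (List (String × String))))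
    (case : List (String × String)) : PySem.Dict String (List (List (String × String))) :=
  let t := pvCaseText case
  if ["auth", "login", "token", "401", "403"].any (fun k => PySem.Str.isIn k t) then
    themes.modify "authentication" [] (· ++ [case])
  else if ["slow", "latency", "timeout", "performance"].any (fun k => PySem.Str.isIn k t) then
    themes.modify "latency" [] (· ++ [case])
  else if ["down", "outage", "unavailable", "503", "500"].any (fun k => PySem.Str.isIn k t) then
    themes.modify "availability" [] (· ++ [case])
  else if ["config", "setting", "parameter", "misconfigur"].any (fun k => PySem.Str.isIn k t) then
    themes.modify "configuration" [] (· ++ [case])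
  else if ["security", "vulnerability", "breach", "unauthorized"].any (fun k => PySem.Str.isIn k t) then
    themes.modify "security" [] (· ++ [case])
  else if ["cost", "bill", "charge", "expensive"].any (fun k => PySem.Str.isIn k t) then
    themes.modify "cost" [] (· ++ [case])
  else
    themes.modify "other" [] (· ++ [case])

def classify_case_themes_py (cases : List (List (String × String))) :
    List (String × List (List (String × String))) :=
  let themes0 : PySem.Dict String (List (List (String × String))) :=
    PySem.Dict.ofList [("authentication", []), ("latency", []), ("availability", []),
      ("configuration", []), ("security", []), ("cost", []), ("other", [])]
  let themes := cases.foldl pvStepA themes0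
  -- {k: v for k, v in themes.items() if v}
  themes.items.filter (fun p => !p.2.isEmpty)

-- ===== PORT B =====
def pvThemeTable : List (String × List String) :=
  [("authentication", ["auth", "login", "token", "401", "403"]),
   ("latency", ["slow", "latency", "timeout", "performance"]),
   ("availability", ["down", "outage", "unavailable", "503", "500"]),
   ("configuration", ["config", "setting", "parameter", "misconfigur"]),
   ("security", ["security", "vulnerability", "breach", "unauthorized"]),
   ("cost", ["cost", "bill", "charge", "expensive"])]

-- _theme_of: first table entry whose keyword occurs in the text, else "other"
def pvThemeOf (case : List (String × String)) : String :=
  let text := pvCaseText case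
  match pvThemeTable.find? (fun p => p.2.any (fun k => PySem.Str.isIn k text)) with
  | some p => p.1
  | none => "other"

def classify_case_themes_py_alt (cases : List (List (String × String))) :
    List (String × List (List (String × String))) :=
  let labeled := cases.map (fun c => (c, pvThemeOf c))
  let names := pvThemeTable.map (·.1) ++ ["other"]
  names.foldl (fun res name =>
    let bucket := (labeled.filter (fun p => p.2 == name)).map (·.1)
    if !bucket.isEmpty then res ++ [(name, bucket)] else res) []

-- ===== PRECONDITION & SPEC =====
def Spec_classify_case_themes_py (cases : List (List (String × String))) (out : List (String × List (List (String × String)))) : Prop := out = classify_case_themes_py_alt cases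
instance (cases : List (List (String × String))) (out : List (String × List (List (String × String)))) : Decidable (Spec_classify_case_themes_py cases out) := by unfold Spec_classify_case_themes_py; infer_instance

-- ===== CLAIM (what is proved, stated in full; the proofs are below) =====
def Claim_equal_classify_case_themes_py : Prop := ∀ (cases : List (List (String × String))), Dom_classify_case_themes_py cases → Spec_classify_case_themes_py cases (classify_case_themes_py cases)

-- ===== LEMMAS AND PROOFS =====

-- A's if/elif chain picks exactly the theme pvThemeOf computes
theorem pvStepA_eq_modify (d : PySem.Dict String (List (List (String × String))))
    (case : List (String × String)) :
    pvStepA d case = d.modify (pvThemeOf case) [] (· ++ [case]) := by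
  unfold pvStepA pvThemeOf pvThemeTable
  simp only [List.find?]
  split_ifs <;> simp_all only [Bool.not_eq_true]

-- the themes dict with its seven fixed buckets
def pvMk (a l av cfg s c o : List (List (String × String))) :
    PySem.Dict String (List (List (String × String))) :=
  PySem.Dict.mk [("authentication", a), ("latency", l), ("availability", av),
    ("configuration", cfg), ("security", s), ("cost", c), ("other", o)]

def pvFilt (n : String) (cases : List (List (String × String))) : List (List (String × String)) :=
  cases.filter (fun c => pvThemeOf c == n)

theorem pvThemeOf_mem (case : List (String × String)) :
    pvThemeOf case ∈ ["authentication", "latency", "availability", "configuration", "security", "cost", "other"] := by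
  unfold pvThemeOf
  cases hf : List.find? (fun p => p.2.any (fun k => PySem.Str.isIn k (pvCaseText case))) pvThemeTable with
  | none => simp only [hf]; simp
  | some p =>
    have hm := List.mem_of_find?_eq_some hf
    simp only [hf]
    fin_cases hm <;> simp

theorem pvModify_pvMk (a l av cfg s c o : List (List (String × String)))
    (case : List (String × String)) (n : String)
    (hn : n ∈ ["authentication", "latency", "availability", "configuration", "security", "cost", "other"]) :
    (pvMk a l av cfg s c o).modify n [] (· ++ [case]) =
      pvMk (a ++ if n = "authentication" then [case] else [])
        (l ++ if n = "latency" then [case] else [])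
        (av ++ if n = "availability" then [case] else [])
        (cfg ++ if n = "configuration" then [case] else [])
        (s ++ if n = "security" then [case] else [])
        (c ++ if n = "cost" then [case] else [])
        (o ++ if n = "other" then [case] else []) := by
  fin_cases hn <;>
    simp [pvMk, PySem.Dict.modify, PySem.Dict.insert, PySem.Dict.contains,
      PySem.Dict.getD, PySem.Dict.get?, List.find?]

theorem pvGFilt (n : String) (hd : List (String × String)) (tl : List (List (String × String))) :
    (if pvThemeOf hd = n then [hd] else []) ++ pvFilt n tl = pvFilt n (hd :: tl) := by
  simp only [pvFilt, List.filter_cons, beq_iff_eq]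
  split_ifs <;> simp

theorem pvLoop_mk (cases : List (List (String × String))) :
    ∀ a l av cfg s c o, cases.foldl pvStepA (pvMk a l av cfg s c o) =
      pvMk (a ++ pvFilt "authentication" cases) (l ++ pvFilt "latency" cases)
        (av ++ pvFilt "availability" cases) (cfg ++ pvFilt "configuration" cases)
        (s ++ pvFilt "security" cases) (c ++ pvFilt "cost" cases) (o ++ pvFilt "other" cases) := by
  induction cases with
  | nil => intro a l av cfg s c o; simp [pvFilt]
  | cons hd tl ih =>
    intro a l av cfg s c o
    rw [List.foldl_cons, pvStepA_eq_modify,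
      pvModify_pvMk a l av cfg s c o hd (pvThemeOf hd) (pvThemeOf_mem hd), ih]
    simp only [List.append_assoc, pvGFilt]

theorem pvFiltB (n : String) (cases : List (List (String × String))) :
    ((cases.map (fun c => (c, pvThemeOf c))).filter (fun p => p.2 == n)).map (fun p => p.1) = pvFilt n cases := by
  induction cases with
  | nil => rfl
  | cons hd tl ih =>
    by_cases h : pvThemeOf hd == n <;> simp [pvFilt, h] at * <;> simp [ih]

theorem pvThemes0 : (PySem.Dict.ofList [("authentication", ([] : List (List (String × String)))),
    ("latency", []), ("availability", []), ("configuration", []), ("security", []),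
    ("cost", []), ("other", [])]) = pvMk [] [] [] [] [] [] [] := by
  simp [pvMk, PySem.Dict.ofList, PySem.Dict.update, PySem.Dict.empty, PySem.Dict.insert,
    PySem.Dict.contains, List.foldl]

theorem pvGen2 {α : Type} (F : String → List α) (names : List String)
    (acc : List (String × List α)) :
    names.foldl (fun res name => if !(F name).isEmpty then res ++ [(name, F name)] else res) acc
    = acc ++ (names.map (fun n => (n, F n))).filter (fun p => !p.2.isEmpty) := by
  induction names generalizing acc with
  | nil => simp
  | cons n ns ih =>
    rw [List.foldl_cons, ih]
    by_cases h : (F n).isEmpty <;> simp [h, List.append_assoc]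

-- ===== VERDICT (by name: the statement is the Claim_ definition above) =====
theorem classify_case_themes_py_spec : Claim_equal_classify_case_themes_py := by
  intro cases _
  unfold Spec_classify_case_themes_py classify_case_themes_py classify_case_themes_py_alt
  simp only [pvThemes0, pvLoop_mk, List.nil_append, pvFiltB]
  simp only [pvThemeTable, List.map, List.cons_append, List.nil_append, pvMk]
  rw [pvGen2 (fun n => pvFilt n cases)]
  simp only [List.map, List.nil_append]
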